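-- pv_equiv track=rewrite | github.com/trishajanath/AltX | backend/soc2_compliance_agent.py | _prepare_evidence
-- ===== SOURCE A (Python) =====
-- from typing import List, Dict, Any, Tuple, Optional
--
-- def _prepare_evidence(control_code: str, system_configs: Dict[str, Dict[str, Any]]) -> Dict[str, Any]:
--     """Prepare evidence dictionary from system configurations"""
--     evidence = {}
--
--     # Aggregate evidence from all systems
--     for system_name, config in system_configs.items():
--         if isinstance(config, dict):
--             for key, value in config.items():
--                 if key not in evidence:
--                     evidence[key] = []
--                 evidence[key].append(value)
--
--     # Determine boolean flags based on evidence presence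
--     prepared = {
--         "policies_documented": len(evidence.get("policies", [])) > 0,
--         "procedures_implemented": len(evidence.get("procedures", [])) > 0,
--         "training_completed": len(evidence.get("training", [])) > 0,
--         "automated_controls": len(evidence.get("automation", [])) > 0,
--         "monitoring_enabled": len(evidence.get("monitoring", [])) > 0,
--         "testing_performed": len(evidence.get("testing", [])) > 0,
--         "documentation_maintained": len(evidence.get("documentation", [])) > 0
--     }
--
--     return prepared
-- ===== SOURCE B (Python) =====
-- def _prepare_evidence(control_code: str, system_configs: dict) -> dict:
--     """Prepare evidence flags by scanning configs directly per target key."""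
--     def has(key):
--         return any(isinstance(c, dict) and key in c for c in system_configs.values())
--     return {
--         "policies_documented": has("policies"),
--         "procedures_implemented": has("procedures"),
--         "training_completed": has("training"),
--         "automated_controls": has("automation"),
--         "monitoring_enabled": has("monitoring"),
--         "testing_performed": has("testing"),
--         "documentation_maintained": has("documentation"),
--     }
-- ===== Notes on version B (the rewrite author's own statement) =====
-- stated objective: simpler
-- what changed: Drops the aggregated evidence dict entirely: each of the seven flags is computed by a direct any()-presence scan of the configs for its key, instead of building a key->values index table and then measuring lookup lengths.
import Mathlib
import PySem

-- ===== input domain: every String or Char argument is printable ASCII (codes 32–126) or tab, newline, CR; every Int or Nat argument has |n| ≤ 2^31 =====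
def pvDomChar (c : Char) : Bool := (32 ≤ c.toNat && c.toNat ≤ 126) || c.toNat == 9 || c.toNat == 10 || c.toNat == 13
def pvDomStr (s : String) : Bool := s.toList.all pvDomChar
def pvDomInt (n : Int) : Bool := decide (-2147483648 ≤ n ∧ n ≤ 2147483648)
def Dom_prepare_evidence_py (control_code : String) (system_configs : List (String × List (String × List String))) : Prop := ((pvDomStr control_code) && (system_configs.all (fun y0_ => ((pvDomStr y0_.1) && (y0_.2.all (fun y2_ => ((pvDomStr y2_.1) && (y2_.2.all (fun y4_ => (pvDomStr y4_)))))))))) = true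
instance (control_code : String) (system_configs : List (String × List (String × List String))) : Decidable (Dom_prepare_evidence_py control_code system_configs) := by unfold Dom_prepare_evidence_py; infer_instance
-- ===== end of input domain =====

-- B drops A's aggregated evidence dict: each flag is a direct presence scan per key (objective: simpler).

-- ===== PORT A =====
-- inner loop body: `if key not in evidence: evidence[key] = []` then `evidence[key].append(value)`
def pvEvStep (d : PySem.Dict String (List (List String))) (kv : String × List String) :
    PySem.Dict String (List (List String)) :=
  let d1 := if d.contains kv.1 then d else d.insert kv.1 []
  d1.insert kv.1 (d1.getD kv.1 [] ++ [kv.2])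

def prepare_evidence_py (control_code : String) (system_configs : List (String × List (String × List String))) : List (String × Bool) :=
  -- `isinstance(config, dict)` is always true under the declared type, so the guard is vacuous here
  let evidence := system_configs.foldl (fun d c => c.2.foldl pvEvStep d) PySem.Dict.empty
  [("policies_documented", decide (0 < (evidence.getD "policies" []).length)),
   ("procedures_implemented", decide (0 < (evidence.getD "procedures" []).length)),
   ("training_completed", decide (0 < (evidence.getD "training" []).length)),
   ("automated_controls", decide (0 < (evidence.getD "automation" []).length)),
   ("monitoring_enabled", decide (0 < (evidence.getD "monitoring" []).length)),
   ("testing_performed", decide (0 < (evidence.getD "testing" []).length)),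
   ("documentation_maintained", decide (0 < (evidence.getD "documentation" []).length))]

-- ===== PORT B =====
def pvHasKey (system_configs : List (String × List (String × List String))) (key : String) : Bool :=
  system_configs.any (fun c => c.2.any (fun kv => kv.1 == key))

def prepare_evidence_py_alt (control_code : String) (system_configs : List (String × List (String × List String))) : List (String × Bool) :=
  [("policies_documented", pvHasKey system_configs "policies"),
   ("procedures_implemented", pvHasKey system_configs "procedures"),
   ("training_completed", pvHasKey system_configs "training"),
   ("automated_controls", pvHasKey system_configs "automation"),
   ("monitoring_enabled", pvHasKey system_configs "monitoring"),
   ("testing_performed", pvHasKey system_configs "testing"),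
   ("documentation_maintained", pvHasKey system_configs "documentation")]

-- ===== PRECONDITION & SPEC =====
def Spec_prepare_evidence_py (control_code : String) (system_configs : List (String × List (String × List String))) (out : List (String × Bool)) : Prop := out = prepare_evidence_py_alt control_code system_configs
instance (control_code : String) (system_configs : List (String × List (String × List String))) (out : List (String × Bool)) : Decidable (Spec_prepare_evidence_py control_code system_configs out) := by unfold Spec_prepare_evidence_py; infer_instance

-- ===== CLAIM (what is proved, stated in full; the proofs are below) =====
def Claim_equal_prepare_evidence_py : Prop := ∀ (control_code : String) (system_configs : List (String × List (String × List String))), Dom_prepare_evidence_py control_code system_configs → Spec_prepare_evidence_py control_code system_configs (prepare_evidence_py control_code system_configs)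

-- ===== LEMMAS AND PROOFS =====
theorem pvEvStep_pos (d : PySem.Dict String (List (List String))) (kv : String × List String) (k : String) :
    decide (0 < ((pvEvStep d kv).getD k []).length) =
      (decide (0 < (d.getD k []).length) || (kv.1 == k)) := by
  unfold pvEvStep
  by_cases h : k = kv.1
  · subst h
    by_cases hc : d.contains kv.1 <;>
      simp [hc, PySem.Dict.getD_insert_self]
  · have h2 : kv.1 ≠ k := Ne.symm h
    by_cases hc : d.contains kv.1 <;>
      simp [hc, PySem.Dict.getD_insert, h, h2]

theorem pvEvInner_pos (items : List (String × List String)) (d : PySem.Dict String (List (List String))) (k : String) :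
    decide (0 < ((items.foldl pvEvStep d).getD k []).length) =
      (decide (0 < (d.getD k []).length) || items.any (fun kv => kv.1 == k)) := by
  induction items generalizing d with
  | nil => simp
  | cons hd tl ih =>
    rw [List.foldl_cons, ih, pvEvStep_pos]
    simp [Bool.or_assoc]

theorem pvEvOuter_pos (cfgs : List (String × List (String × List String))) (d : PySem.Dict String (List (List String))) (k : String) :
    decide (0 < ((cfgs.foldl (fun d c => c.2.foldl pvEvStep d) d).getD k []).length) =
      (decide (0 < (d.getD k []).length) || cfgs.any (fun c => c.2.any (fun kv => kv.1 == k))) := by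
  induction cfgs generalizing d with
  | nil => simp
  | cons hd tl ih =>
    rw [List.foldl_cons, ih, pvEvInner_pos]
    simp [Bool.or_assoc]

-- ===== VERDICT (by name: the statement is the Claim_ definition above) =====
theorem prepare_evidence_py_spec : Claim_equal_prepare_evidence_py := by
  intro control_code system_configs _
  unfold Spec_prepare_evidence_py prepare_evidence_py prepare_evidence_py_alt pvHasKey
  simp [pvEvOuter_pos, PySem.Dict.getD_empty]
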